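-- pv_equiv track=rewrite | github.com/danilosrocha/estrutura-de-dados | Aulas/Introdução/Aula 15.py | cebolinha
-- ===== SOURCE A (Python) =====
-- def cebolinha(frase):
--     ultima_letra = False
--     nova_frase = ''
--
--     for letra in frase:
--         if letra == 'r':
--             if not ultima_letra:
--                 nova_frase += 'l'
--             ultima_letra = True
--         elif letra == 'R':
--             if not ultima_letra:
--                 nova_frase += 'L'
--             ultima_letra = True
--         else:
--             nova_frase += letra
--             ultima_letra = False
--
--     return nova_frase
-- ===== SOURCE B (Python) =====
-- def cebolinha(frase):
--     # Run-based: scan with an index, emit one 'l'/'L' per whole r-run (case from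
--     # the run's first letter), copy all other characters through.
--     out = []
--     i = 0
--     n = len(frase)
--     while i < n:
--         c = frase[i]
--         if c in 'rR':
--             out.append('l' if c == 'r' else 'L')
--             while i < n and frase[i] in 'rR':
--                 i += 1
--         else:
--             out.append(c)
--             i += 1
--     return ''.join(out)
-- ===== Notes on version B (the rewrite author's own statement) =====
-- stated objective: idiomatic
-- what changed: Replaces the per-character boolean flag with a run-based index scan that emits one replacement letter per whole run of r/R (case from the run's first letter) and joins collected pieces.
import Mathlib
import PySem

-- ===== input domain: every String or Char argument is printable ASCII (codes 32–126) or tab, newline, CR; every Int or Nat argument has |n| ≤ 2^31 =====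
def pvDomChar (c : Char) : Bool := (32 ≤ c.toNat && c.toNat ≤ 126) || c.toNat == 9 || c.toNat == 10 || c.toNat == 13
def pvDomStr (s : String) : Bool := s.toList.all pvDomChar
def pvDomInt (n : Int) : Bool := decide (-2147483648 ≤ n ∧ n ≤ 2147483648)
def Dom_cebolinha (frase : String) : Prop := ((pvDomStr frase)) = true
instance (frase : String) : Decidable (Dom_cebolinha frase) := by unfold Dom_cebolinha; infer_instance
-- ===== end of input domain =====

-- B replaces A's per-character flag + string concatenation by a run-based scan
-- that emits one 'l'/'L' per whole r/R-run (idiomatic decomposition; return value only).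


-- ===== PORT A =====
-- per-character loop carrying the 'ultima_letra' flag and the accumulated string
def cebolinhaLoop : List Char → Bool → List Char → List Char
  | [], _, acc => acc
  | c :: rest, ultima, acc =>
    if c = 'r' then
      cebolinhaLoop rest true (if ultima then acc else acc ++ ['l'])
    else if c = 'R' then
      cebolinhaLoop rest true (if ultima then acc else acc ++ ['L'])
    else
      cebolinhaLoop rest false (acc ++ [c])

def cebolinha (frase : String) : String :=
  String.mk (cebolinhaLoop frase.toList false [])

-- ===== PORT B =====
def isR (c : Char) : Bool := c = 'r' || c = 'R'

-- run-based scan: one replacement letter per whole r/R-run, then skip the run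
def cebolinhaAltLoop : List Char → List Char
  | [] => []
  | c :: rest =>
    if isR c then
      (if c = 'r' then 'l' else 'L') :: cebolinhaAltLoop (rest.dropWhile isR)
    else
      c :: cebolinhaAltLoop rest
termination_by l => l.length
decreasing_by
  · have := List.length_dropWhile_le isR rest; simp; omega
  · simp

def cebolinha_alt (frase : String) : String :=
  String.mk (cebolinhaAltLoop frase.toList)

-- ===== PRECONDITION & SPEC =====
def Spec_cebolinha (frase : String) (out : String) : Prop := out = cebolinha_alt frase
instance (frase : String) (out : String) : Decidable (Spec_cebolinha frase out) := by unfold Spec_cebolinha; infer_instance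

-- ===== CLAIM (what is proved, stated in full; the proofs are below) =====
def Claim_equal_cebolinha : Prop := ∀ (frase : String), Dom_cebolinha frase → Spec_cebolinha frase (cebolinha frase)

-- ===== LEMMAS AND PROOFS =====
theorem cebolinhaLoop_eq (l : List Char) : ∀ acc,
    cebolinhaLoop l false acc = acc ++ cebolinhaAltLoop l ∧
    cebolinhaLoop l true acc = acc ++ cebolinhaAltLoop (l.dropWhile isR) := by
  induction l with
  | nil => intro acc; simp [cebolinhaLoop, cebolinhaAltLoop]
  | cons c rest ih =>
    intro acc
    by_cases hr : c = 'r'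
    · subst hr
      constructor
      · rw [show cebolinhaLoop ('r' :: rest) false acc
              = cebolinhaLoop rest true (acc ++ ['l']) by simp [cebolinhaLoop]]
        rw [(ih (acc ++ ['l'])).2]
        simp [cebolinhaAltLoop, isR]
      · rw [show cebolinhaLoop ('r' :: rest) true acc
              = cebolinhaLoop rest true acc by simp [cebolinhaLoop]]
        rw [(ih acc).2]
        simp [List.dropWhile, isR]
    · by_cases hR : c = 'R'
      · subst hR
        constructor
        · rw [show cebolinhaLoop ('R' :: rest) false acc
                = cebolinhaLoop rest true (acc ++ ['L']) by simp [cebolinhaLoop]]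
          rw [(ih (acc ++ ['L'])).2]
          simp [cebolinhaAltLoop, isR]
        · rw [show cebolinhaLoop ('R' :: rest) true acc
                = cebolinhaLoop rest true acc by simp [cebolinhaLoop]]
          rw [(ih acc).2]
          simp [List.dropWhile, isR]
      · have hnr : isR c = false := by simp [isR, hr, hR]
        constructor
        · rw [show cebolinhaLoop (c :: rest) false acc
                = cebolinhaLoop rest false (acc ++ [c]) by simp [cebolinhaLoop, hr, hR]]
          rw [(ih (acc ++ [c])).1]
          simp [cebolinhaAltLoop, hnr]
        · rw [show cebolinhaLoop (c :: rest) true acc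
                = cebolinhaLoop rest false (acc ++ [c]) by simp [cebolinhaLoop, hr, hR]]
          rw [(ih (acc ++ [c])).1]
          simp [List.dropWhile, hnr, cebolinhaAltLoop]

-- ===== VERDICT (by name: the statement is the Claim_ definition above) =====
theorem cebolinha_spec : Claim_equal_cebolinha := by
  intro frase _
  unfold Spec_cebolinha cebolinha cebolinha_alt
  rw [(cebolinhaLoop_eq frase.toList []).1]
  simp
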